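-- pv_equiv track=rewrite | github.com/khoantd/GitVizz | server.py | format_repo_structure
-- ===== SOURCE A (Python) =====
-- from typing import List, Optional, Dict, Any, Tuple, Union
--
-- def format_repo_structure(files: List[dict]) -> str:
--     """Format repository directory structure into text."""
--     text = "Directory Structure:\n\n"
--     tree = {}
--     for file_item in files:  # Renamed 'file' to 'file_item' to avoid conflict
--         parts = file_item["path"].split("/")
--         current_level = tree
--         for i, part in enumerate(parts):
--             if part not in current_level:
--                 current_level[part] = {} if i < len(parts) - 1 else None
--             current_level = current_level[part] if i < len(parts) - 1 else current_level
--
--     def build_index(node, prefix="", depth=0):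
--         result = ""
--         # Sort entries: folders first, then files, all alphabetically
--         entries = sorted(node.items(), key=lambda x: (x[1] is None, x[0].lower()))
--         for i, (name, subnode) in enumerate(entries):
--             is_last = i == len(entries) - 1
--             line_prefix = "└── " if is_last else "├── "
--             child_prefix = "    " if is_last else "│   "
--             result += (
--                 f"{prefix}{line_prefix}{name}{'/' if subnode is not None else ''}\n"
--             )
--             if subnode is not None:
--                 result += build_index(subnode, f"{prefix}{child_prefix}", depth + 1)
--         return result
--
--     text += build_index(tree)
--     return text
-- ===== SOURCE B (Python) =====
-- def format_repo_structure(files):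
--     """Format repository directory structure into text.
--
--     Different decomposition: no mutable nested-dict tree; the path list is
--     recursively grouped by its leading component instead.
--     """
--     paths = [f["path"].split("/") for f in files]
--
--     def render(paths, prefix):
--         # group the component lists by head, keeping first-appearance order
--         groups = {}
--         for p in paths:
--             groups.setdefault(p[0], []).append(p[1:])
--         entries = [(name, any(tails)) for name, tails in groups.items()]
--         entries.sort(key=lambda e: (not e[1], e[0].lower()))
--         lines = []
--         for i, (name, is_dir) in enumerate(entries):
--             last = i == len(entries) - 1
--             lines.append(prefix + ("└── " if last else "├── ") + name + ("/" if is_dir else ""))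
--             if is_dir:
--                 lines.extend(render([t for t in groups[name] if t], prefix + ("    " if last else "│   ")))
--         return lines
--
--     return "Directory Structure:\n\n" + "".join(line + "\n" for line in render(paths, ""))
-- ===== Notes on version B (the rewrite author's own statement) =====
-- stated objective: alternative
-- what changed: B never builds A's mutable nested-dict tree: it recursively groups the list of path-component lists by leading component (first-appearance order) and renders each group directly, sorting (name, is_dir) pairs with the same key.
import Mathlib
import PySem

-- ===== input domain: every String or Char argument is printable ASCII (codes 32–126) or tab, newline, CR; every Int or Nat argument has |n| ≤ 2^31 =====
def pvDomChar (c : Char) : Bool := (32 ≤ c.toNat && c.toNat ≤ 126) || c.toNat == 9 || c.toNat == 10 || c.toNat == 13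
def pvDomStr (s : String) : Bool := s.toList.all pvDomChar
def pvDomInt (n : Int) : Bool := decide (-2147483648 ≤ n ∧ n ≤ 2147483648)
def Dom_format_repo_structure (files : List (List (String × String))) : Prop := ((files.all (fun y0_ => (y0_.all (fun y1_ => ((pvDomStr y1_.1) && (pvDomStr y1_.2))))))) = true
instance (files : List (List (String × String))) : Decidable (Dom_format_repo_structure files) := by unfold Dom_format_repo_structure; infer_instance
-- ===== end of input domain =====

-- B drops A's mutable nested-dict tree entirely: it recursively groups the path component
-- lists by their leading component (first-appearance order) and renders each group directly.

-- ===== PORT A =====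
-- The nested-dict tree {part: subdict-or-None}: leaf = None, dir = a dict (insertion-ordered
-- entry list).
mutual
inductive PyNode : Type
  | leaf : PyNode
  | dir : PyEntries → PyNode
inductive PyEntries : Type
  | nil : PyEntries
  | cons : String → PyNode → PyEntries → PyEntries
end

def PyNode.isLeaf : PyNode → Bool
  | .leaf => true
  | .dir _ => false

mutual
def PyNode.size : PyNode → Nat
  | .leaf => 1
  | .dir es => PyEntries.size es + 1
def PyEntries.size : PyEntries → Nat
  | .nil => 0
  | .cons _ n rest => PyNode.size n + PyEntries.size rest
end

def PyEntries.items : PyEntries → List (String × PyNode)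
  | .nil => []
  | .cons k v rest => (k, v) :: rest.items

def PyEntries.find? : PyEntries → String → Option PyNode
  | .nil, _ => none
  | .cons k v rest, x => if k = x then some v else rest.find? x

def PyEntries.append1 : PyEntries → String → PyNode → PyEntries
  | .nil, k, v => .cons k v .nil
  | .cons k' v' rest, k, v => .cons k' v' (rest.append1 k v)

def PyEntries.update : PyEntries → String → PyNode → PyEntries
  | .nil, _, _ => .nil
  | .cons k' v' rest, k, v => if k' = k then .cons k' v rest else .cons k' v' (rest.update k v)

-- the inner `for i, part in enumerate(parts)` walk of one path into the tree
def insertParts : PyEntries → List String → PyEntries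
  | es, [] => es
  | es, [p] => if (es.find? p).isSome then es else es.append1 p .leaf
  | es, p :: q :: rest =>
      match es.find? p with
      | some (.dir sub) => es.update p (.dir (insertParts sub (q :: rest)))
      | some .leaf => es            -- Python raises TypeError here; such inputs are outside Pre_
      | none => es.append1 p (.dir (insertParts .nil (q :: rest)))
  termination_by _ ps => ps.length

-- the `for file_item in files` loop (missing "path" key = KeyError, outside Pre_)
def buildTree (files : List (List (String × String))) : PyEntries :=
  files.foldl (fun tree fi =>
    match fi.lookup "path" with
    | none => tree
    | some p => insertParts tree ((PySem.Str.split? p "/").getD [])) .nil  -- split? is some: sep "/" ≠ ""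

-- sorted(node.items(), key=lambda x: (x[1] is None, x[0].lower()))
def sortEntries (node : PyEntries) : List (String × PyNode) :=
  PySem.List.sorted2 node.items (fun x => x.2.isLeaf) (fun x => PySem.Str.lower x.1)

theorem items_size_sum (es : PyEntries) :
    ((PyEntries.items es).map (fun e => PyNode.size e.2)).sum = es.size := by
  match es with
  | .nil => rfl
  | .cons k v rest => simp [PyEntries.items, PyEntries.size, items_size_sum rest]

theorem sortEntries_size_sum (es : PyEntries) :
    ((sortEntries es).map (fun e => PyNode.size e.2)).sum = es.size := by
  rw [← items_size_sum es]
  exact List.Perm.sum_eq (List.Perm.map _ (PySem.List.sorted2_perm ..))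

-- build_index: recursion over the sorted entries, accumulating one string with +=
def buildIndexA : List (String × PyNode) → String → String
  | [], _ => ""
  | (name, subnode) :: rest, prefx =>
      let isLast := rest.isEmpty
      let linePrefix := if isLast then "└── " else "├── "
      let childPrefix := if isLast then "    " else "│   "
      let line := prefx ++ linePrefix ++ name ++ (if subnode.isLeaf then "" else "/") ++ "\n"
      match subnode with
      | .leaf => line ++ buildIndexA rest prefx
      | .dir es => line ++ buildIndexA (sortEntries es) (prefx ++ childPrefix) ++ buildIndexA rest prefx
  termination_by l _ => (l.map (fun e => PyNode.size e.2)).sum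
  decreasing_by
  all_goals simp_all [sortEntries_size_sum, PyNode.size]
  all_goals omega

def format_repo_structure (files : List (List (String × String))) : String :=
  "Directory Structure:\n\n" ++ buildIndexA (sortEntries (buildTree files)) ""

-- ===== PORT B =====
-- Source B: paths = [f["path"].split("/") for f in files]; render() groups the component lists
-- by head (first-appearance order), sorts the (name, is_dir) entries with A's key, and
-- recurses on each group's nonempty tails.  No tree is ever built.

def pathsOf (files : List (List (String × String))) : List (List String) :=
  files.map (fun fi => (PySem.Str.split? ((fi.lookup "path").getD "") "/").getD [])

-- groups.setdefault(p[0], []).append(p[1:])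
def addTail : List (String × List (List String)) → String → List String → List (String × List (List String))
  | [], h, t => [(h, [t])]
  | (k, ts) :: rest, h, t => if k = h then (k, ts ++ [t]) :: rest else (k, ts) :: addTail rest h t

def groupPaths (ps : List (List String)) : List (String × List (List String)) :=
  ps.foldl (fun G p => addTail G (p.headD "") (p.drop 1)) []

-- [t for t in groups[name] if t]
def subPaths (G : List (String × List (List String))) (name : String) : List (List String) :=
  ((G.lookup name).getD []).filter (fun t => !t.isEmpty)

-- entries = [(name, any(tails)) …]; entries.sort(key=lambda e: (not e[1], e[0].lower()))
def entriesOf (G : List (String × List (List String))) : List (String × Bool) :=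
  PySem.List.sorted2 (G.map (fun g => (g.1, g.2.any (fun t => !t.isEmpty))))
    (fun e => !e.2) (fun e => PySem.Str.lower e.1)

-- termination support for render (cited by its decreasing_by)
def pathsW (ps : List (List String)) : Nat := (ps.map (fun p => p.length + 1)).sum

theorem pathsW_cons (p : List String) (rest : List (List String)) :
    pathsW (p :: rest) = p.length + 1 + pathsW rest := by
  simp [pathsW]

theorem lookup_addTail (G : List (String × List (List String))) (h : String) (t : List String)
    (name : String) :
    (((addTail G h t).lookup name).getD []) =
      ((G.lookup name).getD []) ++ (if h == name then [t] else []) := by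
  induction G with
  | nil =>
      by_cases hh : h = name
      · subst hh; simp [addTail, List.lookup]
      · have e : (name == h) = false := by simpa using Ne.symm hh
        have e2 : (h == name) = false := by simpa using hh
        simp [addTail, List.lookup, e, e2]
  | cons g rest ih =>
      obtain ⟨k, ts⟩ := g
      by_cases hk : k = h
      · subst hk
        simp only [addTail, reduceIte]
        by_cases hh : k = name
        · subst hh; simp [List.lookup]
        · have e : (name == k) = false := by simpa using Ne.symm hh
          have e2 : (k == name) = false := by simpa using hh
          simp [List.lookup, e, e2]
      · simp only [addTail, if_neg hk]
        by_cases hh : k = name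
        · subst hh
          have e2 : (h == k) = false := by simpa using fun hc => hk hc.symm
          simp [List.lookup, e2]
        · have e : (name == k) = false := by simpa using Ne.symm hh
          simp [List.lookup, e, ih]

theorem lookup_groupPaths_fold (ps : List (List String)) (G : List (String × List (List String)))
    (name : String) :
    (((ps.foldl (fun G p => addTail G (p.headD "") (p.drop 1)) G).lookup name).getD []) =
      ((G.lookup name).getD []) ++
        ps.filterMap (fun p => if (p.headD "") == name then some (p.drop 1) else none) := by
  induction ps generalizing G with
  | nil => simp
  | cons p rest ih =>
      simp only [List.foldl_cons, List.filterMap_cons]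
      rw [ih, lookup_addTail]
      by_cases hh : (p.headD "") == name
      · have e : (if ((p.headD "") == name) = true then some (p.drop 1) else none)
            = some (p.drop 1) := if_pos hh
        rw [e, if_pos hh]
        simp [List.append_assoc]
      · have e : (if ((p.headD "") == name) = true then some (p.drop 1) else none)
            = none := if_neg hh
        rw [e, if_neg hh]
        simp

theorem lookup_groupPaths (ps : List (List String)) (name : String) :
    (((groupPaths ps).lookup name).getD []) =
      ps.filterMap (fun p => if (p.headD "") == name then some (p.drop 1) else none) := by
  have := lookup_groupPaths_fold ps [] name
  simpa [groupPaths, List.lookup] using this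

theorem pathsW_filterMap_le (ps : List (List String)) (name : String) :
    pathsW ((ps.filterMap (fun p => if (p.headD "") == name then some (p.drop 1) else none)).filter
      (fun t => !t.isEmpty)) ≤ (ps.map List.length).sum := by
  induction ps with
  | nil => simp [pathsW]
  | cons p rest ih =>
      simp only [List.filterMap_cons, List.map_cons, List.sum_cons]
      by_cases hh : (p.headD "") == name
      · have e : (if ((p.headD "") == name) = true then some (p.drop 1) else none)
            = some (p.drop 1) := if_pos hh
        rw [e]
        cases p with
        | nil =>
            rw [show List.drop 1 ([] : List String) = [] from rfl, List.filter_cons,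
              show (!(List.isEmpty ([] : List String))) = false from rfl]
            rw [if_neg (by simp)]
            exact ih.trans (Nat.le_add_left _ _)
        | cons a q =>
            rw [show List.drop 1 (a :: q) = q from rfl]
            cases q with
            | nil =>
                rw [List.filter_cons, show (!(List.isEmpty ([] : List String))) = false from rfl,
                  if_neg (by simp)]
                exact ih.trans (Nat.le_add_left _ _)
            | cons b q' =>
                rw [List.filter_cons, show (!(List.isEmpty (b :: q'))) = true from rfl,
                  if_pos rfl, pathsW_cons]
                simp only [List.length_cons]
                omega
      · have e : (if ((p.headD "") == name) = true then some (p.drop 1) else none)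
            = none := if_neg hh
        rw [e]
        exact ih.trans (Nat.le_add_left _ _)

theorem sum_len_le_pathsW (ps : List (List String)) :
    (ps.map List.length).sum ≤ pathsW ps := by
  induction ps with
  | nil => simp [pathsW]
  | cons p rest ih =>
      rw [pathsW_cons]
      simp only [List.map_cons, List.sum_cons]
      omega

theorem subPaths_lt (ps : List (List String)) (name : String) (hps : ps ≠ []) :
    pathsW (subPaths (groupPaths ps) name) < pathsW ps := by
  have h1 := pathsW_filterMap_le ps name
  unfold subPaths
  rw [lookup_groupPaths]
  cases ps with
  | nil => exact absurd rfl hps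
  | cons p rest =>
      have h2 := sum_len_le_pathsW rest
      simp only [List.map_cons, List.sum_cons] at h1
      rw [pathsW_cons]
      simp only [List.filterMap_cons] at h1 ⊢
      omega

def render (ps : List (List String)) (pfx : String) : List String :=
  ((entriesOf (groupPaths ps)).zipIdx).attach.foldl
    (fun lines x =>
      lines ++
        ([pfx ++ (if x.1.2 == (entriesOf (groupPaths ps)).length - 1 then "└── " else "├── ")
            ++ x.1.1.1 ++ (if x.1.1.2 then "/" else "")] ++
         (if x.1.1.2 then
            render (subPaths (groupPaths ps) x.1.1.1)
              (pfx ++ (if x.1.2 == (entriesOf (groupPaths ps)).length - 1 then "    " else "│   "))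
          else [])))
    []
  termination_by pathsW ps
  decreasing_by
    refine subPaths_lt _ _ (fun hnil => ?_)
    rcases x with ⟨x, hx⟩
    subst hnil
    simp [entriesOf, groupPaths, PySem.List.sorted2] at hx

-- "Directory Structure:\n\n" + "".join(line + "\n" for line in render(paths, ""))
def format_repo_structure_alt (files : List (List (String × String))) : String :=
  "Directory Structure:\n\n" ++
    PySem.Str.join "" ((render (pathsOf files) "").map (fun line => line ++ "\n"))

-- ===== PRECONDITION & SPEC =====
def ppB (a b : List String) : Bool := a.isPrefixOf b && decide (a.length < b.length)

-- pairwise scan: a path already present as a plain file may not be a proper prefix of a later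
-- path unless an even earlier path had already extended it
def goodB : List (List String) → List (List String) → Bool
  | _, [] => true
  | seen, p :: rest =>
      (!(rest.any (fun q => ppB p q)) || seen.any (fun q => ppB p q)) && goodB (seen ++ [p]) rest

-- Pre_ holds exactly where the Python A returns: every file dict has a "path" key (else
-- KeyError), and no path whose first contact with the tree is as a plain file (a None leaf) is
-- a proper prefix of a later path (else `part not in None` raises TypeError).
def Pre_format_repo_structure (files : List (List (String × String))) : Prop :=
  (files.all (fun fi => (fi.lookup "path").isSome)) = true ∧
  goodB [] (pathsOf files) = true
instance (files : List (List (String × String))) : Decidable (Pre_format_repo_structure files) := by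
  unfold Pre_format_repo_structure; infer_instance

def pvWitness_format_repo_structure : (List (List (String × String))) :=
  [[("path", "src/main.py")], [("path", "src/Utils.py")], [("path", "README.md")]]

def Spec_format_repo_structure (files : List (List (String × String))) (out : String) : Prop := out = format_repo_structure_alt files
instance (files : List (List (String × String))) (out : String) : Decidable (Spec_format_repo_structure files out) := by unfold Spec_format_repo_structure; infer_instance

-- ===== CLAIM (what is proved, stated in full; the proofs are below) =====
def Claim_equal_format_repo_structure : Prop := ∀ (files : List (List (String × String))), Dom_format_repo_structure files → Pre_format_repo_structure files → Spec_format_repo_structure files (format_repo_structure files)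

-- ===== LEMMAS AND PROOFS =====

-- proof-side vocabulary
def posT (t : List String) : Bool := !t.isEmpty
def fpr (name : String) (p : List String) : Option (List String) :=
  if (p.headD "") == name then some (p.drop 1) else none
def foldTree (ps : List (List String)) : PyEntries := ps.foldl insertParts .nil
def nodeOf (ts : List (List String)) : PyNode :=
  if ts.any posT then .dir (foldTree (ts.filter posT)) else .leaf
def treeOfGroups : List (String × List (List String)) → PyEntries
  | [] => .nil
  | (k, ts) :: rest => .cons k (nodeOf ts) (treeOfGroups rest)
def unlines : List String → String
  | [] => ""
  | s :: t => s ++ "\n" ++ unlines t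

-- the splits form of goodB
def GoodS (ps : List (List String)) : Prop :=
  ∀ l p r, ps = l ++ p :: r → (∃ q ∈ r, ppB p q = true) → ∃ q ∈ l, ppB p q = true

theorem goodB_iff (ps seen : List (List String)) :
    goodB seen ps = true ↔
      ∀ l p r, ps = l ++ p :: r → (∃ q ∈ r, ppB p q = true) → ∃ q ∈ seen ++ l, ppB p q = true := by
  induction ps generalizing seen with
  | nil =>
      constructor
      · intro _ l p r hl
        exact absurd hl (by simp)
      · intro _; rfl
  | cons p rest ih =>
      simp only [goodB, Bool.and_eq_true, Bool.or_eq_true, Bool.not_eq_true']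
      constructor
      · rintro ⟨c1, c2⟩ l q r hl hex
        cases l with
        | nil =>
            simp only [List.nil_append] at hl
            injection hl with h1 h2
            subst h1; subst h2
            rcases c1 with hno | hyes
            · obtain ⟨q', hq', hpp⟩ := hex
              have : rest.any (fun q => ppB p q) = true := List.any_eq_true.mpr ⟨q', hq', hpp⟩
              rw [this] at hno; exact absurd hno (by simp)
            · obtain ⟨q', hq', hpp⟩ := List.any_eq_true.mp hyes
              exact ⟨q', by simpa using hq', hpp⟩
        | cons a l' =>
            injection hl with h1 h2
            subst h1
            have := (ih (seen ++ [p])).mp c2 l' q r h2 hex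
            simpa [List.append_assoc] using this
      · intro hR
        refine ⟨?_, (ih (seen ++ [p])).mpr ?_⟩
        · by_cases hany : rest.any (fun q => ppB p q) = true
          · right
            obtain ⟨q', hq', hpp⟩ := List.any_eq_true.mp hany
            obtain ⟨w, hw, hppw⟩ := hR [] p rest rfl ⟨q', hq', hpp⟩
            exact List.any_eq_true.mpr ⟨w, by simpa using hw, hppw⟩
          · left; simpa using hany
        · intro l q r hl hex
          have := hR (p :: l) q r (by simp [hl]) hex
          simpa [List.append_assoc] using this

theorem GoodS_of_goodB (ps : List (List String)) (h : goodB [] ps = true) : GoodS ps := by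
  intro l p r hl hex
  simpa using (goodB_iff ps []).mp h l p r hl hex

-- groupPaths structure
theorem lookup_addTail_isSome (G : List (String × List (List String))) (h : String)
    (t : List String) (name : String) :
    ((addTail G h t).lookup name).isSome = ((G.lookup name).isSome || (h == name)) := by
  induction G with
  | nil =>
      by_cases hh : h = name
      · subst hh; simp [addTail, List.lookup]
      · have e : (name == h) = false := by simpa using Ne.symm hh
        have e2 : (h == name) = false := by simpa using hh
        simp [addTail, List.lookup, e, e2]
  | cons g rest ih =>
      obtain ⟨k, ts⟩ := g
      by_cases hk : k = h
      · subst hk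
        simp only [addTail, reduceIte]
        by_cases hh : k = name
        · subst hh; simp [List.lookup]
        · have e : (name == k) = false := by simpa using Ne.symm hh
          simp [List.lookup, e, hh]
      · simp only [addTail, if_neg hk]
        by_cases hh : k = name
        · subst hh; simp [List.lookup]
        · have e : (name == k) = false := by simpa using Ne.symm hh
          simp [List.lookup, e, ih]

theorem lookup_groupPaths_fold_isSome (ps : List (List String))
    (G : List (String × List (List String))) (name : String) :
    ((ps.foldl (fun G p => addTail G (p.headD "") (p.drop 1)) G).lookup name).isSome =
      ((G.lookup name).isSome || ps.any (fun p => (p.headD "") == name)) := by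
  induction ps generalizing G with
  | nil => simp
  | cons p rest ih =>
      simp only [List.foldl_cons, List.any_cons]
      rw [ih, lookup_addTail_isSome]
      cases hG : (G.lookup name).isSome <;> cases hp : ((p.headD "") == name) <;> simp

theorem lookup_groupPaths_isSome (ps : List (List String)) (name : String) :
    ((groupPaths ps).lookup name).isSome = ps.any (fun p => (p.headD "") == name) := by
  have := lookup_groupPaths_fold_isSome ps [] name
  simpa [groupPaths, List.lookup] using this

theorem keys_addTail (G : List (String × List (List String))) (h : String) (t : List String) :
    (addTail G h t).map Prod.fst =
      if h ∈ G.map Prod.fst then G.map Prod.fst else G.map Prod.fst ++ [h] := by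
  induction G with
  | nil => simp [addTail]
  | cons g rest ih =>
      obtain ⟨k, ts⟩ := g
      by_cases hk : k = h
      · subst hk; simp [addTail]
      · simp only [addTail, if_neg hk, List.map_cons, ih]
        by_cases hmem : h ∈ rest.map Prod.fst
        · rw [if_pos hmem, if_pos (by simp [hmem])]
        · rw [if_neg hmem, if_neg (by simp [hmem, Ne.symm hk]), List.cons_append]

theorem keys_nodup_fold (ps : List (List String)) (G : List (String × List (List String)))
    (hnd : (G.map Prod.fst).Nodup) :
    (((ps.foldl (fun G p => addTail G (p.headD "") (p.drop 1)) G)).map Prod.fst).Nodup := by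
  induction ps generalizing G with
  | nil => exact hnd
  | cons p rest ih =>
      simp only [List.foldl_cons]
      refine ih _ ?_
      rw [keys_addTail]
      by_cases hmem : (p.headD "") ∈ G.map Prod.fst
      · rw [if_pos hmem]; exact hnd
      · rw [if_neg hmem]
        rw [List.nodup_append]
        refine ⟨hnd, List.nodup_singleton _, ?_⟩
        intro a ha b hb
        have hbe : b = p.headD "" := by simpa using hb
        subst hbe
        intro heq
        exact hmem (heq ▸ ha)

theorem keys_nodup_groupPaths (ps : List (List String)) :
    ((groupPaths ps).map Prod.fst).Nodup := by
  exact keys_nodup_fold ps [] (by simp)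

theorem lookup_of_mem_of_nodup {β : Type} (l : List (String × β))
    (hnd : (l.map Prod.fst).Nodup) (name : String) (v : β) (h : (name, v) ∈ l) :
    l.lookup name = some v := by
  induction l with
  | nil => exact absurd h (by simp)
  | cons g rest ih =>
      obtain ⟨k, w⟩ := g
      simp only [List.map_cons, List.nodup_cons] at hnd
      rcases List.mem_cons.mp h with heq | hmem
      · injection heq with h1 h2
        subst h1; subst h2
        simp [List.lookup]
      · have hk : k ≠ name := by
          intro hkn; subst hkn
          exact hnd.1 (List.mem_map.mpr ⟨(k, v), hmem, rfl⟩)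
        have e : (name == k) = false := by simpa using Ne.symm hk
        simp only [List.lookup, e]
        exact ih hnd.2 hmem

theorem lookup_of_mem_groupPaths (ps : List (List String)) (name : String)
    (ts : List (List String)) (h : (name, ts) ∈ groupPaths ps) :
    (groupPaths ps).lookup name = some ts := by
  exact lookup_of_mem_of_nodup (groupPaths ps) (keys_nodup_groupPaths ps) name ts h

-- S1 : the tree A builds is the grouping B computes
theorem nodeOf_append_nil (ts : List (List String)) :
    nodeOf (ts ++ [[]]) = nodeOf ts := by
  simp [nodeOf, posT, List.any_append, List.filter_append]

theorem foldTree_append (l : List (List String)) (t : List String) :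
    foldTree (l ++ [t]) = insertParts (foldTree l) t := by
  simp [foldTree, List.foldl_append]

theorem nodeOf_append_pos (ts : List (List String)) (t : List String) (ht : posT t = true) :
    nodeOf (ts ++ [t]) = .dir (insertParts (foldTree (ts.filter posT)) t) := by
  have h1 : (ts ++ [t]).any posT = true := by simp [List.any_append, ht]
  have h2 : (ts ++ [t]).filter posT = ts.filter posT ++ [t] := by
    simp [List.filter_append, ht]
  simp [nodeOf, h1, h2, foldTree_append]

theorem insertParts_cons_ne (k : String) (v : PyNode) (es' : PyEntries) (h : String)
    (t : List String) (hk : k ≠ h) :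
    insertParts (.cons k v es') (h :: t) = .cons k v (insertParts es' (h :: t)) := by
  have hfind : (PyEntries.cons k v es').find? h = es'.find? h := by
    simp [PyEntries.find?, hk]
  cases t with
  | nil =>
      simp only [insertParts]
      rw [hfind]
      by_cases c : (es'.find? h).isSome
      · rw [if_pos c, if_pos c]
      · rw [if_neg c, if_neg c]; rfl
  | cons q tr =>
      simp only [insertParts]
      rw [hfind]
      cases hf : es'.find? h with
      | none => simp [PyEntries.append1]
      | some n =>
          cases n with
          | leaf => simp
          | dir sub => simp [PyEntries.update, hk]

theorem insert_treeOfGroups (G : List (String × List (List String))) (h : String)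
    (t : List String)
    (hyp : ∀ ts, G.lookup h = some ts → ts.any posT = false → t = []) :
    insertParts (treeOfGroups G) (h :: t) = treeOfGroups (addTail G h t) := by
  induction G with
  | nil =>
      cases t with
      | nil =>
          simp [insertParts, treeOfGroups, addTail, PyEntries.find?, PyEntries.append1,
            nodeOf, posT]
      | cons q tr =>
          simp [insertParts, treeOfGroups, addTail, PyEntries.find?, PyEntries.append1,
            nodeOf, posT, foldTree]
  | cons g rest ih =>
      obtain ⟨k, ts⟩ := g
      by_cases hk : k = h
      · subst hk
        have hfind : (treeOfGroups ((k, ts) :: rest)).find? k = some (nodeOf ts) := by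
          simp [treeOfGroups, PyEntries.find?]
        cases t with
        | nil =>
            simp only [insertParts, hfind, Option.isSome_some, if_true]
            simp only [addTail, reduceIte]
            show treeOfGroups ((k, ts) :: rest) = treeOfGroups ((k, ts ++ [[]]) :: rest)
            simp [treeOfGroups, nodeOf_append_nil]
        | cons q tr =>
            by_cases hAny : ts.any posT = true
            · have hnode : nodeOf ts = .dir (foldTree (ts.filter posT)) := by
                simp [nodeOf, hAny]
              simp only [insertParts, hfind, hnode]
              simp only [addTail, reduceIte]
              show (treeOfGroups ((k, ts) :: rest)).update k
                  (.dir (insertParts (foldTree (ts.filter posT)) (q :: tr)))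
                  = treeOfGroups ((k, ts ++ [q :: tr]) :: rest)
              show (PyEntries.cons k (nodeOf ts) (treeOfGroups rest)).update k
                  (.dir (insertParts (foldTree (ts.filter posT)) (q :: tr)))
                  = PyEntries.cons k (nodeOf (ts ++ [q :: tr])) (treeOfGroups rest)
              simp only [PyEntries.update, reduceIte]
              rw [nodeOf_append_pos ts (q :: tr) (by simp [posT])]
            · have hA : ts.any posT = false := by simpa using hAny
              have := hyp ts (by simp [List.lookup]) hA
              exact absurd this (by simp)
      · have hrest : ∀ ts', rest.lookup h = some ts' → ts'.any posT = false → t = [] := by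
          intro ts' hl hA
          refine hyp ts' ?_ hA
          have e : (h == k) = false := by simpa using fun hc => hk hc.symm
          simp [List.lookup, e, hl]
        rw [show treeOfGroups ((k, ts) :: rest) = .cons k (nodeOf ts) (treeOfGroups rest) from rfl,
          insertParts_cons_ne k (nodeOf ts) (treeOfGroups rest) h t hk, ih hrest]
        simp [addTail, hk, treeOfGroups]

theorem exists_first_split {α : Type} (pr : α → Bool) :
    ∀ (l : List α), l.any pr = true →
      ∃ l1 x l2, l = l1 ++ x :: l2 ∧ pr x = true ∧ ∀ y ∈ l1, pr y = false := by
  intro l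
  induction l with
  | nil => simp
  | cons a rest ih =>
      intro hany
      by_cases pa : pr a = true
      · exact ⟨[], a, rest, rfl, pa, by simp⟩
      · have pa' : pr a = false := by simpa using pa
        have : rest.any pr = true := by simpa [pa'] using hany
        obtain ⟨l1, x, l2, he, hx, hall⟩ := ih this
        refine ⟨a :: l1, x, l2, by simp [he], hx, ?_⟩
        intro y hy
        rcases List.mem_cons.mp hy with h1 | h2
        · subst h1; exact pa'
        · exact hall y h2

theorem ppB_length (a b : List String) (h : ppB a b = true) : a.length < b.length := by
  have := (Bool.and_eq_true _ _).mp h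
  simpa using this.2

theorem ppB_cons (x : String) (a b : List String) : ppB (x :: a) (x :: b) = ppB a b := by
  simp [ppB, List.isPrefixOf]

theorem ppB_cons_elim (x : String) (a w : List String) (h : ppB (x :: a) w = true) :
    ∃ wt, w = x :: wt ∧ ppB a wt = true := by
  cases w with
  | nil => simp [ppB, List.isPrefixOf] at h
  | cons c wt =>
      have hx : x = c := by
        have := (Bool.and_eq_true _ _).mp h
        have h1 := this.1
        simp only [List.isPrefixOf, Bool.and_eq_true, beq_iff_eq] at h1
        exact h1.1
      subst hx
      rw [ppB_cons] at h
      exact ⟨wt, rfl, h⟩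

theorem ppB_singleton_intro (h : String) (t : List String) (ht : t ≠ []) :
    ppB [h] (h :: t) = true := by
  cases t with
  | nil => exact absurd rfl ht
  | cons b tb => simp [ppB, List.isPrefixOf]

theorem ppB_singleton_elim (h : String) (q : List String) (hq : ppB [h] q = true) :
    q.headD "" = h ∧ q.drop 1 ≠ [] := by
  obtain ⟨wt, rfl, hpp⟩ := ppB_cons_elim h [] q hq
  refine ⟨rfl, ?_⟩
  have := ppB_length [] wt hpp
  intro hc
  rw [show List.drop 1 (h :: wt) = wt from rfl] at hc
  subst hc
  simp at this

theorem fold_insert_eq : ∀ (ps : List (List String)) (G : List (String × List (List String))),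
    (∀ l p r, ps = l ++ p :: r → p ≠ [] ∧
      (∀ ts, ((l.foldl (fun G p => addTail G (p.headD "") (p.drop 1)) G).lookup (p.headD ""))
          = some ts → ts.any posT = false → p.drop 1 = [])) →
    ps.foldl insertParts (treeOfGroups G)
      = treeOfGroups (ps.foldl (fun G p => addTail G (p.headD "") (p.drop 1)) G)
  | [], G, _ => rfl
  | p :: rest, G, hyp => by
      have h0 := hyp [] p rest rfl
      have hcons : p = p.headD "" :: p.drop 1 := by
        cases p with
        | nil => exact absurd rfl h0.1
        | cons a q => rfl
      simp only [List.foldl_cons]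
      rw [show insertParts (treeOfGroups G) p
          = insertParts (treeOfGroups G) (p.headD "" :: p.drop 1) from by rw [← hcons],
        insert_treeOfGroups G _ _ (fun ts hl hA => h0.2 ts hl hA)]
      exact fold_insert_eq rest (addTail G (p.headD "") (p.drop 1)) (fun l q r hl =>
        hyp (p :: l) q r (by rw [hl]; rfl))

theorem foldTree_eq (ps : List (List String)) (hg : GoodS ps) (hne : ∀ p ∈ ps, p ≠ []) :
    foldTree ps = treeOfGroups (groupPaths ps) := by
  refine fold_insert_eq ps [] ?_
  intro l p r hl
  have hpps : p ∈ ps := by rw [hl]; simp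
  refine ⟨hne p hpps, ?_⟩
  intro ts hts hA
  by_contra hdrop
  have hGl : (l.foldl (fun G p => addTail G (p.headD "") (p.drop 1)) []) = groupPaths l := rfl
  rw [hGl] at hts
  have hts' : ts = l.filterMap
      (fun p' => if (p'.headD "") == (p.headD "") then some (p'.drop 1) else none) := by
    have := lookup_groupPaths l (p.headD "")
    rw [hts] at this
    simpa using this
  have hsome : l.any (fun p' => (p'.headD "") == (p.headD "")) = true := by
    rw [← lookup_groupPaths_isSome, hts]
    rfl
  obtain ⟨l1, p0, l2, hsplit, hp0, hfirst⟩ := exists_first_split _ l hsome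
  have hp0ps : p0 ∈ ps := by rw [hl, hsplit]; simp
  have hp0ne : p0 ≠ [] := hne p0 hp0ps
  have hmem : p0.drop 1 ∈ ts := by
    rw [hts']
    exact List.mem_filterMap.mpr ⟨p0, by rw [hsplit]; simp, by rw [if_pos hp0]⟩
  have hdrop0 : p0.drop 1 = [] := by
    have := List.any_eq_false.mp (by simpa using hA) _ hmem
    simpa [posT] using this
  have hp0eq : p0 = [p.headD ""] := by
    cases p0 with
    | nil => exact absurd rfl hp0ne
    | cons a q =>
        have ha : a = p.headD "" := by simpa using hp0
        have hq : q = [] := by simpa using hdrop0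
        rw [ha, hq]
  have hps2 : ps = l1 ++ p0 :: (l2 ++ p :: r) := by
    rw [hl, hsplit]
    simp
  have hpcons : p = p.headD "" :: p.drop 1 := by
    cases p with
    | nil => exact absurd rfl (hne _ hpps)
    | cons a q => rfl
  have hex : ∃ q ∈ l2 ++ p :: r, ppB p0 q = true := by
    refine ⟨p, by simp, ?_⟩
    rw [hp0eq, hpcons]
    exact ppB_singleton_intro _ _ (by simpa using hdrop)
  obtain ⟨q', hq'mem, hq'pp⟩ := hg l1 p0 _ hps2 hex
  rw [hp0eq] at hq'pp
  have hpr : (q'.headD "" == p.headD "") = true := by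
    simpa using (ppB_singleton_elim _ _ hq'pp).1
  have hpr' := hfirst q' hq'mem
  simp only at hpr'
  rw [hpr] at hpr'
  exact absurd hpr' (by simp)

theorem items_treeOfGroups (G : List (String × List (List String))) :
    (treeOfGroups G).items = G.map (fun g => (g.1, nodeOf g.2)) := by
  induction G with
  | nil => rfl
  | cons g rest ih =>
      obtain ⟨k, ts⟩ := g
      simp [treeOfGroups, PyEntries.items, ih]

-- stable sort commutes with reindexing the elements
theorem insertBy_map {α β : Type} (f : α → β) (b : β → β → Bool) (b' : α → α → Bool)
    (hb : ∀ x y, b (f x) (f y) = b' x y) (x : α) (l : List α) :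
    PySem.List.insertBy b (f x) (l.map f) = (PySem.List.insertBy b' x l).map f := by
  induction l with
  | nil => rfl
  | cons y ys ih =>
      simp only [List.map_cons, PySem.List.insertBy, hb]
      by_cases hxy : b' x y = true
      · simp [hxy]
      · have e : b' x y = false := by simpa using hxy
        simp [e, ih]

theorem sorted2_map {α β κ₂ : Type} [LT κ₂] [DecidableLT κ₂] (f : α → β)
    (k1 : β → Bool) (k2 : β → κ₂) (l : List α) :
    PySem.List.sorted2 (l.map f) k1 k2 =
      (PySem.List.sorted2 l (fun x => k1 (f x)) (fun x => k2 (f x))).map f := by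
  show List.foldl _ [] (l.map f) = (List.foldl _ [] l).map f
  rw [List.foldl_map]
  have key : ∀ (acc : List α),
      List.foldl (fun acc x =>
          PySem.List.insertBy (fun a c =>
            decide (k1 a < k1 c) || !decide (k1 c < k1 a) && decide (k2 a < k2 c)) (f x) acc)
        (acc.map f) l
      = (List.foldl (fun acc x =>
          PySem.List.insertBy (fun a c =>
            decide (k1 (f a) < k1 (f c)) ||
              !decide (k1 (f c) < k1 (f a)) && decide (k2 (f a) < k2 (f c))) x acc) acc l).map f := by
    induction l with
    | nil => intro acc; rfl
    | cons y ys ih =>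
        intro acc
        simp only [List.foldl_cons]
        rw [insertBy_map (f := f)
          (b := fun a c => decide (k1 a < k1 c) || !decide (k1 c < k1 a) && decide (k2 a < k2 c))
          (b' := fun a c => decide (k1 (f a) < k1 (f c)) ||
            !decide (k1 (f c) < k1 (f a)) && decide (k2 (f a) < k2 (f c))) (fun _ _ => rfl)]
        exact ih _
  simpa using key []

-- Good is inherited by every subgroup
theorem filterMap_split {α β : Type} (f : α → Option β) :
    ∀ (l : List α) (l' r' : List β) (x : β), l.filterMap f = l' ++ x :: r' →
      ∃ l1 a r1, l = l1 ++ a :: r1 ∧ f a = some x ∧ l1.filterMap f = l' ∧ r1.filterMap f = r' := by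
  intro l
  induction l with
  | nil => intro l' r' x h; exact absurd h (by simp)
  | cons a rest ih =>
      intro l' r' x h
      rw [List.filterMap_cons] at h
      cases hf : f a with
      | none =>
          rw [hf] at h
          obtain ⟨l1, a', r1, he, hfa, hfl, hfr⟩ := ih l' r' x h
          exact ⟨a :: l1, a', r1, by rw [he]; rfl, hfa,
            by rw [List.filterMap_cons, hf, hfl], hfr⟩
      | some b =>
          rw [hf] at h
          cases l' with
          | nil =>
              simp only [List.nil_append] at h
              injection h with h1 h2
              exact ⟨[], a, rest, rfl, by rw [hf, h1], rfl, h2⟩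
          | cons c l'' =>
              simp only [List.cons_append] at h
              injection h with h1 h2
              obtain ⟨l1, a', r1, he, hfa, hfl, hfr⟩ := ih l'' r' x h2
              exact ⟨a :: l1, a', r1, by rw [he]; rfl, hfa,
                by rw [List.filterMap_cons, hf, hfl, h1], hfr⟩

theorem ggr_some (name : String) (p t : List String) (hp : p ≠ []) :
    (Option.filter posT (fpr name p) = some t) ↔ (p = name :: t ∧ t ≠ []) := by
  cases p with
  | nil => exact absurd rfl hp
  | cons a q =>
      constructor
      · intro h
        by_cases ha : a = name
        · subst ha
          have e : fpr a (a :: q) = some q := by simp [fpr]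
          rw [e] at h
          by_cases hq : posT q = true
          · have : Option.filter posT (some q) = some q := by simp [Option.filter, hq]
            rw [this] at h
            injection h with h1
            subst h1
            exact ⟨rfl, by simpa [posT] using hq⟩
          · have hq' : posT q = false := by simpa using hq
            have : Option.filter posT (some q) = none := by simp [Option.filter, hq']
            rw [this] at h
            exact absurd h (by simp)
        · have e : fpr name (a :: q) = none := by simp [fpr, ha]
          rw [e] at h
          exact absurd h (by simp)
      · rintro ⟨hpe, hne⟩
        injection hpe with h1 h2
        subst h1; subst h2
        have e : fpr a (a :: q) = some q := by simp [fpr]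
        rw [e]
        simp [Option.filter, posT, hne]

theorem GoodS_sub (ps : List (List String)) (name : String) (hg : GoodS ps)
    (hne : ∀ p ∈ ps, p ≠ []) :
    GoodS ((ps.filterMap (fpr name)).filter posT) := by
  intro l' t r' hsplit hex
  rw [List.filter_filterMap] at hsplit
  obtain ⟨l1, a, r1, hl, hfa, hfl, hfr⟩ := filterMap_split _ ps l' r' t hsplit
  have hane : a ≠ [] := hne a (by rw [hl]; simp)
  obtain ⟨hae, htne⟩ := (ggr_some name a t hane).mp hfa
  obtain ⟨q', hq'm, hq'pp⟩ := hex
  rw [← hfr] at hq'm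
  obtain ⟨qa, hqam, hqaf⟩ := List.mem_filterMap.mp hq'm
  have hqane : qa ≠ [] := hne qa (by rw [hl]; simp [hqam])
  obtain ⟨hqae, _⟩ := (ggr_some name qa q' hqane).mp hqaf
  have hex2 : ∃ q ∈ r1, ppB a q = true :=
    ⟨qa, hqam, by rw [hae, hqae, ppB_cons]; exact hq'pp⟩
  obtain ⟨w, hwm, hwpp⟩ := hg l1 a r1 hl hex2
  rw [hae] at hwpp
  obtain ⟨wt, hw, hppw⟩ := ppB_cons_elim name t w hwpp
  have hwtne : wt ≠ [] := by
    have hlen := ppB_length t wt hppw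
    intro hc
    subst hc
    simp at hlen
  refine ⟨wt, ?_, hppw⟩
  rw [← hfl]
  exact List.mem_filterMap.mpr
    ⟨w, hwm, (ggr_some name w wt (hne w (by rw [hl]; simp [hwm]))).mpr ⟨hw, hwtne⟩⟩

-- string glue
theorem unlines_append (a b : List String) : unlines (a ++ b) = unlines a ++ unlines b := by
  induction a with
  | nil => simp [unlines]
  | cons s t ih => simp [unlines, ih, String.append_assoc]

theorem join_cons_empty (a : String) (t : List String) :
    PySem.Str.join "" (a :: t) = a ++ PySem.Str.join "" t := by
  cases t with
  | nil =>
      show PySem.Str.join "" [a] = a ++ PySem.Str.join "" []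
      simp only [PySem.Str.join, List.map]
      rw [PySem.Chars.join_singleton, String.ofList_toList,
        show PySem.Chars.join "".toList [] = [] from rfl]
      rw [show String.ofList [] = "" from rfl, String.append_empty]
  | cons b r =>
      simp only [PySem.Str.join, List.map]
      rw [PySem.Chars.join_cons_cons, String.ofList_append, String.ofList_append,
        String.ofList_toList]
      rw [show String.ofList "".toList = "" from rfl]
      simp

theorem join_empty_map (ls : List String) :
    PySem.Str.join "" (ls.map (fun line => line ++ "\n")) = unlines ls := by
  induction ls with
  | nil => rfl
  | cons s t ih =>
      simp only [List.map_cons]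
      rw [join_cons_empty, ih, unlines, String.append_assoc]

-- the per-entry emission of render's loop body
def emitF (G : List (String × List (List String))) (N : Nat) (pfx : String)
    (x : (String × Bool) × Nat) : List String :=
  [pfx ++ (if x.2 == N - 1 then "└── " else "├── ") ++ x.1.1 ++ (if x.1.2 then "/" else "")] ++
    (if x.1.2 then
      render (subPaths G x.1.1) (pfx ++ (if x.2 == N - 1 then "    " else "│   "))
    else [])

theorem subPaths_eq (G : List (String × List (List String))) (name : String)
    (ts : List (List String)) (h : G.lookup name = some ts) :
    subPaths G name = ts.filter posT := by
  unfold subPaths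
  rw [h]
  rfl

theorem isLeaf_nodeOf (ts : List (List String)) :
    (nodeOf ts).isLeaf = !(ts.any posT) := by
  by_cases h : ts.any posT = true
  · simp [nodeOf, h, PyNode.isLeaf]
  · have h' : ts.any posT = false := by simpa using h
    simp [nodeOf, h', PyNode.isLeaf]

theorem render_eq_flatMap (ps : List (List String)) (pfx : String) :
    render ps pfx = ((entriesOf (groupPaths ps)).zipIdx).flatMap
      (emitF (groupPaths ps) (entriesOf (groupPaths ps)).length pfx) := by
  rw [render]
  have : (List.foldl (fun lines x =>
      lines ++ emitF (groupPaths ps) (entriesOf (groupPaths ps)).length pfx x.1) []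
      (entriesOf (groupPaths ps)).zipIdx.attach)
      = ((entriesOf (groupPaths ps)).zipIdx).flatMap
          (emitF (groupPaths ps) (entriesOf (groupPaths ps)).length pfx) := by
    rw [List.foldl_attach
      (f := fun lines x => lines ++ emitF (groupPaths ps) (entriesOf (groupPaths ps)).length pfx x),
      PySem.List.foldl_append_eq_flatMap]
    rfl
  exact this

theorem core (G : List (String × List (List String))) (N : Nat) (pfx : String) :
    ∀ (S : List (String × List (List String))) (i0 : Nat), i0 + S.length = N →
      (∀ g ∈ S, G.lookup g.1 = some g.2) →
      (∀ g ∈ S, g.2.any posT = true → ∀ pfx',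
        buildIndexA (sortEntries (foldTree (g.2.filter posT))) pfx'
          = unlines (render (g.2.filter posT) pfx')) →
      buildIndexA (S.map (fun g => (g.1, nodeOf g.2))) pfx
        = unlines (((S.map (fun g => (g.1, g.2.any posT))).zipIdx i0).flatMap (emitF G N pfx)) := by
  intro S
  induction S generalizing pfx with
  | nil => intro i0 _ _ _; simp [buildIndexA, unlines]
  | cons g rest ih =>
      intro i0 hN hlk hIH
      obtain ⟨name, ts⟩ := g
      simp only [List.map_cons, List.zipIdx_cons, List.flatMap_cons]
      rw [unlines_append]
      have hrest : buildIndexA (rest.map fun g => (g.1, nodeOf g.2)) pfx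
          = unlines (((rest.map fun g => (g.1, g.2.any posT)).zipIdx (i0 + 1)).flatMap
              (emitF G N pfx)) := by
        refine ih pfx (i0 + 1) ?_ (fun g hg => hlk g (by simp [hg]))
          (fun g hg => hIH g (by simp [hg]))
        simp only [List.length_cons] at hN
        omega
      have hlast : (i0 == N - 1) = rest.isEmpty := by
        cases rest with
        | nil =>
            simp only [List.length_cons, List.length_nil] at hN
            simp [show i0 = N - 1 by omega]
        | cons a b =>
            have hne : i0 ≠ N - 1 := by
              simp only [List.length_cons] at hN
              omega
            simp [hne, List.isEmpty]
      by_cases hA : ts.any posT = true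
      · have hnode : nodeOf ts = .dir (foldTree (ts.filter posT)) := by
          simp [nodeOf, hA]
        have hIH0 := hIH (name, ts) (by simp) hA
        simp only at hIH0
        have hlk0 := hlk (name, ts) (by simp)
        simp only at hlk0
        simp only [buildIndexA, hnode, List.isEmpty_map, emitF, hA, hlast]
        simp only [reduceIte]
        rw [unlines_append, subPaths_eq G name ts hlk0,
          ← hIH0 (pfx ++ (if rest.isEmpty = true then "    " else "│   "))]
        rw [hrest, ← hnode]
        simp [isLeaf_nodeOf, hA, unlines, String.append_assoc, String.append_empty]
      · have hA' : ts.any posT = false := by simpa using hA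
        have hnode : nodeOf ts = .leaf := by simp [nodeOf, hA']
        simp only [buildIndexA, hnode, List.isEmpty_map, emitF, hA', hlast]
        rw [hrest, ← hnode]
        simp [isLeaf_nodeOf, hA', unlines, String.append_assoc, String.append_empty]

theorem mem_sorted2_groups (ps : List (List String)) (g : String × List (List String))
    (hg : g ∈ PySem.List.sorted2 (groupPaths ps) (fun g => !(g.2.any posT))
      (fun g => PySem.Str.lower g.1)) :
    g ∈ groupPaths ps :=
  (PySem.List.sorted2_perm ..).mem_iff.mp hg

-- main equivalence, by strong induction on the total weight
theorem main_aux (n : Nat) : ∀ (ps : List (List String)) (pfx : String), pathsW ps ≤ n →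
    GoodS ps → (∀ p ∈ ps, p ≠ []) →
    buildIndexA (sortEntries (foldTree ps)) pfx = unlines (render ps pfx) := by
  induction n with
  | zero =>
      intro ps pfx hW _ _
      have hps : ps = [] := by
        cases ps with
        | nil => rfl
        | cons p r => rw [pathsW_cons] at hW; omega
      subst hps
      rw [render_eq_flatMap]
      simp [foldTree, sortEntries, PyEntries.items, PySem.List.sorted2, buildIndexA,
        entriesOf, groupPaths, unlines]
  | succ n ihn =>
      intro ps pfx hW hg hne
      by_cases hps : ps = []
      · subst hps
        rw [render_eq_flatMap]
        simp [foldTree, sortEntries, PyEntries.items, PySem.List.sorted2, buildIndexA,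
          entriesOf, groupPaths, unlines]
      · set G := groupPaths ps with hG
        set S := PySem.List.sorted2 G (fun g => !(g.2.any posT))
          (fun g => PySem.Str.lower g.1) with hS
        have hsortA : sortEntries (foldTree ps) = S.map (fun g => (g.1, nodeOf g.2)) := by
          rw [foldTree_eq ps hg hne]
          unfold sortEntries
          rw [items_treeOfGroups]
          rw [sorted2_map (f := fun g => (g.1, nodeOf g.2)) (k1 := fun x => x.2.isLeaf)
            (k2 := fun x => PySem.Str.lower x.1) (l := G)]
          rw [hS]
          simp [isLeaf_nodeOf]
        have hsortB : entriesOf G = S.map (fun g => (g.1, g.2.any posT)) := by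
          unfold entriesOf
          rw [show (fun t : List String => !t.isEmpty) = posT from rfl]
          rw [sorted2_map (f := fun g => (g.1, g.2.any posT)) (k1 := fun e => !e.2)
            (k2 := fun e => PySem.Str.lower e.1) (l := G)]
        rw [hsortA, render_eq_flatMap, ← hG, hsortB]
        simp only [List.length_map]
        refine core G S.length pfx S 0 (by omega) ?_ ?_
        · intro g hgS
          exact lookup_of_mem_groupPaths ps g.1 g.2 (mem_sorted2_groups ps g hgS)
        · intro g hgS hAny pfx'
          have hlk := lookup_of_mem_groupPaths ps g.1 g.2 (mem_sorted2_groups ps g hgS)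
          have hsub : g.2 = ps.filterMap (fpr g.1) := by
            have := lookup_groupPaths ps g.1
            rw [hlk] at this
            simpa [fpr] using this
          have hWlt : pathsW (g.2.filter posT) ≤ n := by
            have h1 : pathsW (subPaths G g.1) < pathsW ps := subPaths_lt ps g.1 hps
            rw [subPaths_eq G g.1 g.2 hlk] at h1
            omega
          refine ihn (g.2.filter posT) pfx' hWlt ?_ ?_
          · rw [hsub]
            exact GoodS_sub ps g.1 hg hne
          · intro p hp
            have := List.mem_filter.mp hp
            intro hc
            subst hc
            simp [posT] at this

theorem buildTree_eq (files : List (List (String × String)))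
    (h : (files.all (fun fi => (fi.lookup "path").isSome)) = true) :
    buildTree files = foldTree (pathsOf files) := by
  unfold buildTree foldTree pathsOf
  rw [List.foldl_map]
  apply PySem.List.foldl_congr_mem
  intro acc fi hfi
  have hs : (fi.lookup "path").isSome = true := by
    have := List.all_eq_true.mp h fi hfi
    simpa using this
  cases hp : fi.lookup "path" with
  | none => rw [hp] at hs; exact absurd hs (by simp)
  | some p => rfl

theorem splitOn_go_ne_nil (sep : List Char) :
    ∀ (fuel : Nat) (l cur : List Char) (acc : List (List Char)),
      PySem.Chars.splitOn.go sep fuel l cur acc ≠ [] := by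
  intro fuel
  induction fuel with
  | zero =>
      intro l cur acc
      show ((cur.reverse ++ l) :: acc).reverse ≠ []
      simp
  | succ fuel ih =>
      intro l cur acc
      cases l with
      | nil =>
          show (cur.reverse :: acc).reverse ≠ []
          simp
      | cons c rest =>
          show (if sep.isPrefixOf (c :: rest) = true then
              PySem.Chars.splitOn.go sep fuel (List.drop sep.length (c :: rest)) []
                (cur.reverse :: acc)
            else PySem.Chars.splitOn.go sep fuel rest (c :: cur) acc) ≠ []
          by_cases hpre : sep.isPrefixOf (c :: rest) = true
          · rw [if_pos hpre]; exact ih _ _ _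
          · rw [if_neg hpre]; exact ih _ _ _

theorem pathsOf_ne_nil (files : List (List (String × String))) :
    ∀ p ∈ pathsOf files, p ≠ [] := by
  intro p hp
  obtain ⟨fi, hfi, hpe⟩ := List.mem_map.mp hp
  subst hpe
  have hsplit : PySem.Str.split? ((fi.lookup "path").getD "") "/"
      = some ((PySem.Chars.splitOn ((fi.lookup "path").getD "").toList "/".toList).map
          String.ofList) := by
    simp [PySem.Str.split?, PySem.Chars.split?]
  rw [hsplit]
  simp only [Option.getD_some, ne_eq, List.map_eq_nil_iff]
  unfold PySem.Chars.splitOn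
  exact splitOn_go_ne_nil _ _ _ _ _

-- ===== VERDICT (by name: the statement is the Claim_ definition above) =====
theorem format_repo_structure_spec : Claim_equal_format_repo_structure := by
  intro files _ hpre
  obtain ⟨h1, h2⟩ := hpre
  unfold Spec_format_repo_structure format_repo_structure format_repo_structure_alt
  rw [buildTree_eq files h1, join_empty_map,
    main_aux (pathsW (pathsOf files)) (pathsOf files) "" le_rfl (GoodS_of_goodB _ h2)
      (pathsOf_ne_nil files)]
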